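-- pv_equiv track=rewrite | github.com/Arsen1302/Code-copy-detector | TestData/solutions/problem_1123_3.py | solution_1123_3
-- ===== SOURCE A (Python) =====
-- def solution_1123_3(n: int, k: int) -> str:
--     ans = ''
--     while (n - 1) * 26 >= k:
--         ans += 'a'
--         n -= 1; k -= 1
--     ans += chr(ord('a') + (k % 26 or 26) - 1)
--     ans += 'z' * (n - 1)
--     return ans
-- ===== SOURCE B (Python) =====
-- def solution_1123_3(n: int, k: int) -> str:
--     t = (26 * (n - 1) - k) // 25 + 1
--     if t < 0:
--         t = 0
--     n -= t
--     k -= t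
--     return 'a' * t + chr(ord('a') + (k % 26 or 26) - 1) + 'z' * (n - 1)
-- ===== Notes on version B (the rewrite author's own statement) =====
-- stated objective: faster
-- what changed: Replaced A's character-by-character while loop (which appends one 'a' per iteration) with a closed-form computation of the number of leading 'a's via floor division, then builds the answer with string multiplication.
import Mathlib
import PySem

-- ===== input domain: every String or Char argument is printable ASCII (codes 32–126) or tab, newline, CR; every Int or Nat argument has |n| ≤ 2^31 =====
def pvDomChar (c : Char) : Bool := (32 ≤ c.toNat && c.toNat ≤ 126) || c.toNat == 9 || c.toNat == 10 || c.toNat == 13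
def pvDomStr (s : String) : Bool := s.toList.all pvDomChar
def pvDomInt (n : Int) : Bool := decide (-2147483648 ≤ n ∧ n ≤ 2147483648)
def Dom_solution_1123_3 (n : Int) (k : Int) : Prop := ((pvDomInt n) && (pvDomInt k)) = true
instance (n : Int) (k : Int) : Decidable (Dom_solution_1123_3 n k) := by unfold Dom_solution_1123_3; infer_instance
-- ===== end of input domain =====

-- B replaces A's one-'a'-per-iteration while loop by a closed-form count of the
-- leading 'a's (floor division) and builds the string by repetition (objective: faster).

-- ===== PORT A =====
-- chr(ord('a') + (k % 26 or 26) - 1); Python `x or 26` on an int is 26 iff x == 0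
def pvMidChar (k : Int) : Char :=
  let m := PySem.Int.mod k 26
  let r : Int := if m = 0 then 26 else m
  Char.ofNat (97 + r - 1).toNat

-- A's while loop, over the string as a list of chars, same state (n, k, ans).
-- `fuel` only makes the recursion structural: solution_1123_3 passes enough fuel
-- that the `0` case (which is the loop-exit tail of A) is reached only when the
-- loop condition is already false.
def pvLoopA (fuel : Nat) (n k : Int) (ans : List Char) : List Char :=
  match fuel with
  | 0 => (ans ++ [pvMidChar k]) ++ List.replicate (n - 1).toNat 'z'
  | f + 1 =>
    if (n - 1) * 26 ≥ k then
      pvLoopA f (n - 1) (k - 1) (ans ++ ['a'])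
    else
      (ans ++ [pvMidChar k]) ++ List.replicate (n - 1).toNat 'z'

def solution_1123_3 (n : Int) (k : Int) : String :=
  String.ofList (pvLoopA ((n - 1) * 26 - k + 26).toNat n k [])

-- ===== PORT B =====
def solution_1123_3_alt (n : Int) (k : Int) : String :=
  let t0 := PySem.Int.floordiv (26 * (n - 1) - k) 25 + 1
  let t := if t0 < 0 then 0 else t0
  let n' := n - t
  let k' := k - t
  String.ofList ((List.replicate t.toNat 'a' ++ [pvMidChar k']) ++ List.replicate (n' - 1).toNat 'z')

-- ===== PRECONDITION & SPEC =====
def Spec_solution_1123_3 (n : Int) (k : Int) (out : String) : Prop := out = solution_1123_3_alt n k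
instance (n : Int) (k : Int) (out : String) : Decidable (Spec_solution_1123_3 n k out) := by unfold Spec_solution_1123_3; infer_instance

-- ===== CLAIM (what is proved, stated in full; the proofs are below) =====
def Claim_equal_solution_1123_3 : Prop := ∀ (n : Int) (k : Int), Dom_solution_1123_3 n k → Spec_solution_1123_3 n k (solution_1123_3 n k)

-- ===== LEMMAS AND PROOFS =====

-- number of loop iterations of A, in omega-friendly (ediv) form
def pvT (n k : Int) : Int := max 0 ((26 * (n - 1) - k) / 25 + 1)

lemma pvLoopA_eq (fuel : Nat) (n k : Int) (ans : List Char)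
    (hf : (n - 1) * 26 - k + 26 ≤ (fuel : Int)) :
    pvLoopA fuel n k ans =
      ans ++ ((List.replicate (pvT n k).toNat 'a' ++ [pvMidChar (k - pvT n k)])
        ++ List.replicate (n - pvT n k - 1).toNat 'z') := by
  induction fuel generalizing n k ans with
  | zero =>
      have ht : pvT n k = 0 := by unfold pvT; omega
      rw [pvLoopA, ht]
      simp
  | succ f ih =>
      rw [pvLoopA]
      split_ifs with hc
      · have ht : pvT n k = pvT (n - 1) (k - 1) + 1 := by unfold pvT; omega
        rw [ih (n - 1) (k - 1) _ (by omega), ht]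
        have h1 : (pvT (n - 1) (k - 1) + 1).toNat = (pvT (n - 1) (k - 1)).toNat + 1 := by
          unfold pvT; omega
        have hk : k - (pvT (n - 1) (k - 1) + 1) = k - 1 - pvT (n - 1) (k - 1) := by ring
        have hn : n - (pvT (n - 1) (k - 1) + 1) - 1 = n - 1 - pvT (n - 1) (k - 1) - 1 := by ring
        rw [h1, hk, hn, List.replicate_succ]
        simp
      · have ht : pvT n k = 0 := by unfold pvT; omega
        rw [ht]
        simp

-- ===== VERDICT (by name: the statement is the Claim_ definition above) =====
theorem solution_1123_3_spec : Claim_equal_solution_1123_3 := by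
  intro n k _
  unfold Spec_solution_1123_3 solution_1123_3 solution_1123_3_alt
  rw [pvLoopA_eq _ n k [] (by omega)]
  rw [PySem.Int.floordiv_eq_ediv_of_pos (by norm_num : (0:Int) < 25)]
  have ht : (if (26 * (n - 1) - k) / 25 + 1 < 0 then (0:Int) else (26 * (n - 1) - k) / 25 + 1)
      = pvT n k := by unfold pvT; omega
  simp only [ht, List.nil_append]
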